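-- pv_equiv track=rewrite | github.com/TsinghuaMetabolism/Met-A-Cell | src/metacell/dataloader/_annotate_cell_type.py | find_close_elements
-- ===== SOURCE A (Python) =====
-- import bisect
--
-- def find_close_elements(list1, list2, offset=1):
--     """
--     Input: list1 and list2 are two lists of integers.
--     The 'offset' parameter specifies the maximum allowable difference (default is 1).
--
--     Condition: For each element x in list1, if there exists an element y in list2 such that |x - y| <= offset,
--     then x will be added to the result list.
--
--     Output: A list containing all elements from list1 that meet the condition.
--     """
--     sorted_list2 = sorted(list2)
--     result = []
--     for x in list1:
--         left = x - offset
--         right = x + offset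
--         # Use binary search to determine if there is an element within the [left, right] range
--         idx = bisect.bisect_left(sorted_list2, left)
--         if idx < len(sorted_list2) and sorted_list2[idx] <= right:
--             result.append(x)
--     return(result)
-- ===== SOURCE B (Python) =====
-- def find_close_elements(list1, list2, offset=1):
--     # Direct nested scan: keep each x of list1 that has some y in list2 within offset.
--     return [x for x in list1 if any(abs(x - y) <= offset for y in list2)]
-- ===== Notes on version B (the rewrite author's own statement) =====
-- stated objective: simpler
-- what changed: Replaced sort-plus-binary-search (build a sorted copy of list2, then probe it with bisect_left per element of list1) with a one-line nested scan: each x of list1 is kept iff any y in list2 satisfies |x-y| <= offset; no sorted copy, no index arithmetic.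
import Mathlib
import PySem

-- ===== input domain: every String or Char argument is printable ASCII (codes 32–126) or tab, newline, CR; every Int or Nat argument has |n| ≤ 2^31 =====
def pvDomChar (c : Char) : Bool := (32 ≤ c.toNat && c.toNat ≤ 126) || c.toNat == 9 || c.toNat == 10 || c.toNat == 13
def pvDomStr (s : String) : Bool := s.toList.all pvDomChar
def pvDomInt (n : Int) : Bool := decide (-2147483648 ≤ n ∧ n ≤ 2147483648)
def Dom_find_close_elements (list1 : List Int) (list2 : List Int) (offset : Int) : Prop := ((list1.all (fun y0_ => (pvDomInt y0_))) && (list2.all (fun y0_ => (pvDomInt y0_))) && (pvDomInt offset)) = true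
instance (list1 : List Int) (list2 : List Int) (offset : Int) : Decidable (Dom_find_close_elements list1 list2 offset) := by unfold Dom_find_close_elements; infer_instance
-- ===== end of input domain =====

-- B replaces A's sort-plus-binary-search with a plain nested scan (any |x-y| ≤ offset); simpler, same results.

-- ===== PORT A =====
-- sorted(list2); for each x, bisect_left probe into the sorted copy, append x on a hit.
def find_close_elements (list1 : List Int) (list2 : List Int) (offset : Int) : List Int :=
  let sorted_list2 := PySem.List.sorted list2 (fun y => y) false
  list1.foldl (fun result x =>
    let left := x - offset
    let right := x + offset
    let idx := PySem.List.bisectLeft sorted_list2 left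
    if idx < sorted_list2.length ∧ sorted_list2.getD idx 0 ≤ right then result ++ [x]
    else result) []

-- ===== PORT B =====
-- list comprehension: keep x iff any y in list2 has |x - y| ≤ offset
def find_close_elements_alt (list1 : List Int) (list2 : List Int) (offset : Int) : List Int :=
  list1.filter (fun x => list2.any (fun y => decide (|x - y| ≤ offset)))

-- ===== PRECONDITION & SPEC =====
def Spec_find_close_elements (list1 : List Int) (list2 : List Int) (offset : Int) (out : List Int) : Prop := out = find_close_elements_alt list1 list2 offset
instance (list1 : List Int) (list2 : List Int) (offset : Int) (out : List Int) : Decidable (Spec_find_close_elements list1 list2 offset out) := by unfold Spec_find_close_elements; infer_instance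

-- ===== CLAIM (what is proved, stated in full; the proofs are below) =====
def Claim_equal_find_close_elements : Prop := ∀ (list1 : List Int) (list2 : List Int) (offset : Int), Dom_find_close_elements list1 list2 offset → Spec_find_close_elements list1 list2 offset (find_close_elements list1 list2 offset)

-- ===== LEMMAS AND PROOFS =====

-- A's probe condition on the sorted copy holds iff some y of list2 lies within offset of x.
theorem probe_iff_any (list2 : List Int) (x offset : Int) :
    (PySem.List.bisectLeft (PySem.List.sorted list2 (fun y => y) false) (x - offset) <
        (PySem.List.sorted list2 (fun y => y) false).length ∧
      (PySem.List.sorted list2 (fun y => y) false).getD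
        (PySem.List.bisectLeft (PySem.List.sorted list2 (fun y => y) false) (x - offset)) 0 ≤ x + offset)
    ↔ (list2.any (fun y => decide (|x - y| ≤ offset)) = true) := by
  set s := PySem.List.sorted list2 (fun y => y) false with hs_def
  have hpw : s.Pairwise (fun a b => a ≤ b) := PySem.List.sorted_pairwise list2 (fun y => y)
  obtain ⟨hle, hlt, hge⟩ := PySem.List.bisectLeft_spec s (x - offset) hpw
  set idx := PySem.List.bisectLeft s (x - offset) with hidx_def
  have hmono : ∀ (i j : Nat) (hi : i < s.length) (hj : j < s.length), i ≤ j → s[i] ≤ s[j] := by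
    intro i j hi hj hij
    rcases Nat.lt_or_ge i j with h | h
    · exact (List.pairwise_iff_getElem.mp hpw) i j hi hj h
    · have : i = j := Nat.le_antisymm hij h
      subst this; exact le_refl _
  constructor
  · rintro ⟨h1, h2⟩
    have hy : s[idx] ∈ s := List.getElem_mem h1
    have hy2 : s[idx] ∈ list2 := (PySem.List.mem_sorted _ _ _ _).mp hy
    have hlow : x - offset ≤ s[idx] := hge idx h1 (le_refl _)
    have hgd : s.getD idx 0 = s[idx] := List.getD_eq_getElem s 0 h1
    rw [hgd] at h2
    rw [List.any_eq_true]
    exact ⟨s[idx], hy2, by simp [abs_le]; omega⟩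
  · intro h
    rw [List.any_eq_true] at h
    obtain ⟨y, hy, hyc⟩ := h
    have hyc' : x - offset ≤ y ∧ y ≤ x + offset := by
      simp [abs_le] at hyc; omega
    have hys : y ∈ s := (PySem.List.mem_sorted _ _ _ _).mpr hy
    obtain ⟨j, hj, hjy⟩ := List.mem_iff_getElem.mp hys
    have hij : idx ≤ j := by
      by_contra hc
      push Not at hc
      have := hlt j hj hc
      rw [hjy] at this
      omega
    have h1 : idx < s.length := Nat.lt_of_le_of_lt hij hj
    refine ⟨h1, ?_⟩
    have hgd : s.getD idx 0 = s[idx] := List.getD_eq_getElem s 0 h1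
    rw [hgd]
    have := hmono idx j h1 hj hij
    rw [hjy] at this
    omega

-- ===== VERDICT (by name: the statement is the Claim_ definition above) =====
theorem find_close_elements_spec : Claim_equal_find_close_elements := by
  intro list1 list2 offset _
  unfold Spec_find_close_elements find_close_elements find_close_elements_alt
  rw [PySem.List.foldl_append_ite_eq_filter]
  rw [List.nil_append]
  apply List.filter_congr
  intro x _
  rcases Bool.eq_false_or_eq_true (list2.any (fun y => decide (|x - y| ≤ offset))) with h | h
  · rw [h]
    exact decide_eq_true ((probe_iff_any list2 x offset).mpr h)
  · rw [h]
    apply decide_eq_false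
    rw [probe_iff_any]
    simp [h]
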